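-- pv_equiv track=rewrite | github.com/cedrik-fuoco-adsk/OpenRV | cmake/scripts/apply_sed.py | _bre_to_python_regex
-- ===== SOURCE A (Python) =====
-- def _bre_to_python_regex(bre_pattern):
--     """Convert a sed BRE (Basic Regular Expression) pattern to Python regex.
--
--     In BRE:
--         ( ) ? + { } | are literal characters
--         \\( \\) are group delimiters
--         \\? \\+ are quantifiers (GNU extension)
--         \\{ \\} are interval brackets
--         \\| is alternation (GNU extension)
--         . * ^ $ [ ] \\ are special as in Python regex
--     """
--     result = []
--     i = 0
--     while i < len(bre_pattern):
--         if bre_pattern[i] == "\\" and i + 1 < len(bre_pattern):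
--             next_char = bre_pattern[i + 1]
--             if next_char == "(":
--                 result.append("(")
--             elif next_char == ")":
--                 result.append(")")
--             elif next_char == "{":
--                 result.append("{")
--             elif next_char == "}":
--                 result.append("}")
--             elif next_char == "?":
--                 result.append("?")
--             elif next_char == "+":
--                 result.append("+")
--             elif next_char == "|":
--                 result.append("|")
--             elif next_char == "1":
--                 result.append("\\1")
--             elif next_char == "2":
--                 result.append("\\2")
--             elif next_char == "3":
--                 result.append("\\3")
--             elif next_char == "4":
--                 result.append("\\4")
--             elif next_char == "5":
--                 result.append("\\5")
--             elif next_char == "6":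
--                 result.append("\\6")
--             elif next_char == "7":
--                 result.append("\\7")
--             elif next_char == "8":
--                 result.append("\\8")
--             elif next_char == "9":
--                 result.append("\\9")
--             else:
--                 # Other backslash sequences pass through (e.g. \n, \t, \., \\)
--                 result.append("\\")
--                 result.append(next_char)
--             i += 2
--             continue
--         elif bre_pattern[i] == "(":
--
--             result.append("\\(")
--         elif bre_pattern[i] == ")":
--             result.append("\\)")
--         elif bre_pattern[i] == "?":
--             result.append("\\?")
--         elif bre_pattern[i] == "+":
--             result.append("\\+")
--         elif bre_pattern[i] == "{":
--             result.append("\\{")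
--         elif bre_pattern[i] == "}":
--             result.append("\\}")
--         elif bre_pattern[i] == "|":
--             result.append("\\|")
--         else:
--             result.append(bre_pattern[i])
--             i += 1
--             continue
--         i += 1
--     return "".join(result)
-- ===== SOURCE B (Python) =====
-- import re
--
-- _SPECIALS = "(){}?+|"
--
-- def _bre_to_python_regex(bre_pattern):
--     def repl(m):
--         c = m.group(1)
--         if c is not None:
--             # escaped char: BRE specials become bare; everything else keeps its backslash
--             return c if c in _SPECIALS else "\\" + c
--         return "\\" + m.group(2)
--     return re.sub(r"\\(.)|([(){}?+|])", repl, bre_pattern, flags=re.DOTALL)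
-- ===== Notes on version B (the rewrite author's own statement) =====
-- stated objective: idiomatic
-- what changed: Replaces A's hand-written index loop with its 50-line elif chain by a single re.sub over the whole pattern with regex r'\\(.)|([(){}?+|])' (DOTALL) and a small replacement function driven by which group matched.
import Mathlib
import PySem

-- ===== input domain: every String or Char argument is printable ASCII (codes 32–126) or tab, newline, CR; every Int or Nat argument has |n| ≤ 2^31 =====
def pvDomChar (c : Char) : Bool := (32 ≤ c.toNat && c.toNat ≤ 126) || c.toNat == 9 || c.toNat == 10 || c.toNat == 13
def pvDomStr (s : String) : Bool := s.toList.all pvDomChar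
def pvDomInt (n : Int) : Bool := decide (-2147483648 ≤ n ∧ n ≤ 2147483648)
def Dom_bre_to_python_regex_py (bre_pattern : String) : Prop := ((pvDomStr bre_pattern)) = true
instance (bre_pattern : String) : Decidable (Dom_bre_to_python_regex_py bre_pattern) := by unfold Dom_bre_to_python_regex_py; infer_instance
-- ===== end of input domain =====

-- B replaces A's hand-written index loop with a single re.sub over the whole pattern
-- using a replacement function (objective: idiomatic); return values are proved equal.

-- ===== PORT A =====
-- the elif chain of the escaped-character branch, in A's branch order; each piece a string (as List Char)
def escA (n : Char) : List (List Char) :=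
  if n = '(' then [['(']]
  else if n = ')' then [[')']]
  else if n = '{' then [['{']]
  else if n = '}' then [['}']]
  else if n = '?' then [['?']]
  else if n = '+' then [['+']]
  else if n = '|' then [['|']]
  else if n = '1' then [['\\', '1']]
  else if n = '2' then [['\\', '2']]
  else if n = '3' then [['\\', '3']]
  else if n = '4' then [['\\', '4']]
  else if n = '5' then [['\\', '5']]
  else if n = '6' then [['\\', '6']]
  else if n = '7' then [['\\', '7']]
  else if n = '8' then [['\\', '8']]
  else if n = '9' then [['\\', '9']]
  else [['\\'], [n]]          -- result.append("\\"); result.append(next_char)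

-- the unescaped elif chain (also reached when a final '\' has no following char)
def plainA (c : Char) : List (List Char) :=
  if c = '(' then [['\\', '(']]
  else if c = ')' then [['\\', ')']]
  else if c = '?' then [['\\', '?']]
  else if c = '+' then [['\\', '+']]
  else if c = '{' then [['\\', '{']]
  else if c = '}' then [['\\', '}']]
  else if c = '|' then [['\\', '|']]
  else [[c]]

-- the while loop over i: '\' with a following char consumes two, otherwise one
def goA : List Char → List (List Char)
  | [] => []
  | '\\' :: n :: rest => escA n ++ goA rest
  | c :: rest => plainA c ++ goA rest

def bre_to_python_regex_py (bre_pattern : String) : String :=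
  String.mk (PySem.Chars.join [] (goA bre_pattern.toList))   -- "".join(result)

-- ===== PORT B =====
def specialsB : List Char := ['(', ')', '{', '}', '?', '+', '|']

-- the replacement function repl(m): group(1) = char after a backslash, group(2) = bare special
def replB (g1 g2 : Option Char) : List Char :=
  match g1 with
  | some c => if specialsB.contains c then [c] else ['\\', c]
  | none =>
    match g2 with
    | some c => ['\\', c]
    | none => []

-- re.sub(r"\\(.)|([(){}?+|])", repl, s, flags=re.DOTALL): the regex engine scans left to
-- right; at each position alternative 1 matches '\' plus any char (DOTALL), else
-- alternative 2 matches one bare special, else the char is copied unchanged.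
-- Exact port of re.sub for this fixed pattern.
def goB : List Char → List Char
  | [] => []
  | '\\' :: c :: rest => replB (some c) none ++ goB rest
  | c :: rest =>
    if specialsB.contains c then replB none (some c) ++ goB rest
    else c :: goB rest

def bre_to_python_regex_py_alt (bre_pattern : String) : String :=
  String.mk (goB bre_pattern.toList)

-- ===== PRECONDITION & SPEC =====
def Spec_bre_to_python_regex_py (bre_pattern : String) (out : String) : Prop := out = bre_to_python_regex_py_alt bre_pattern
instance (bre_pattern : String) (out : String) : Decidable (Spec_bre_to_python_regex_py bre_pattern out) := by unfold Spec_bre_to_python_regex_py; infer_instance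

-- ===== CLAIM (what is proved, stated in full; the proofs are below) =====
def Claim_equal_bre_to_python_regex_py : Prop := ∀ (bre_pattern : String), Dom_bre_to_python_regex_py bre_pattern → Spec_bre_to_python_regex_py bre_pattern (bre_to_python_regex_py bre_pattern)

-- ===== LEMMAS AND PROOFS =====
lemma join_nil_flatten (L : List (List Char)) : PySem.Chars.join ([] : List Char) L = L.flatten := by
  induction L with
  | nil => simp [PySem.Chars.join_nil]
  | cons a t ih =>
    cases t with
    | nil => simp [PySem.Chars.join_singleton]
    | cons b u => simp [PySem.Chars.join_cons_cons] at *; simp [ih]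

lemma escA_eq (n : Char) : (escA n).flatten = replB (some n) none := by
  by_cases h1 : n = '('
  · subst h1; decide
  by_cases h2 : n = ')'
  · subst h2; decide
  by_cases h3 : n = '{'
  · subst h3; decide
  by_cases h4 : n = '}'
  · subst h4; decide
  by_cases h5 : n = '?'
  · subst h5; decide
  by_cases h6 : n = '+'
  · subst h6; decide
  by_cases h7 : n = '|'
  · subst h7; decide
  by_cases h8 : n = '1'
  · subst h8; decide
  by_cases h9 : n = '2'
  · subst h9; decide
  by_cases h10 : n = '3'
  · subst h10; decide
  by_cases h11 : n = '4'
  · subst h11; decide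
  by_cases h12 : n = '5'
  · subst h12; decide
  by_cases h13 : n = '6'
  · subst h13; decide
  by_cases h14 : n = '7'
  · subst h14; decide
  by_cases h15 : n = '8'
  · subst h15; decide
  by_cases h16 : n = '9'
  · subst h16; decide
  have hA : escA n = [['\\'], [n]] := by
    unfold escA
    rw [if_neg h1, if_neg h2, if_neg h3, if_neg h4, if_neg h5, if_neg h6, if_neg h7, if_neg h8, if_neg h9, if_neg h10, if_neg h11, if_neg h12, if_neg h13, if_neg h14, if_neg h15, if_neg h16]
  have hc : specialsB.contains n = false := by
    simp [specialsB, h1, h2, h3, h4, h5, h6, h7]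
  have hB : replB (some n) none = ['\\', n] := by
    simp only [replB, hc, Bool.false_eq_true, ite_false]
  rw [hA, hB]
  simp

lemma plainA_eq (c : Char) :
    (plainA c).flatten = if c ∈ specialsB then ['\\', c] else [c] := by
  unfold plainA
  split_ifs <;> first | (subst_vars; decide) | (simp_all [specialsB])

lemma goB_cons_ne (c : Char) (rest : List Char) (hc : c ≠ '\\') :
    goB (c :: rest) = if specialsB.contains c then replB none (some c) ++ goB rest
                      else c :: goB rest := by
  rw [goB.eq_def]; split <;> simp_all

lemma goA_flatten_eq_goB (l : List Char) : (goA l).flatten = goB l := by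
  fun_induction goA l with
  | case1 => rfl
  | case2 n rest ih => simp [goB, escA_eq, ih]
  | case3 c rest h ih =>
    have key : (plainA c ++ goA rest).flatten =
        if specialsB.contains c then replB none (some c) ++ goB rest else c :: goB rest := by
      rw [List.flatten_append, plainA_eq, ih]
      by_cases hs : c ∈ specialsB <;> simp [hs, replB, List.contains_eq_mem]
    cases rest with
    | nil =>
      rw [key]
      by_cases hc : c = '\\'
      · subst hc; decide
      · rw [goB_cons_ne _ _ hc]
    | cons b u =>
      have hc : c ≠ '\\' := fun hh => h b u hh rfl
      rw [key, goB_cons_ne _ _ hc]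

-- ===== VERDICT (by name: the statement is the Claim_ definition above) =====
theorem bre_to_python_regex_py_spec : Claim_equal_bre_to_python_regex_py := by
  intro s _
  unfold Spec_bre_to_python_regex_py bre_to_python_regex_py bre_to_python_regex_py_alt
  rw [join_nil_flatten, goA_flatten_eq_goB]
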